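-- pv_equiv track=rewrite | github.com/jasonmai/427H1p0T66 | Jason/jm_part2.py | generate_weight_matrix
-- ===== SOURCE A (Python) =====
-- NUM_STOCKS = 100
--
-- CONSTS = [1,1,1,1,1,1,1,1,1,1,1,1]
--
-- def weight(day, stock_num, eq_comp_matrix):
--     if (day < 2):
--         return 99
--     constants = CONSTS
--     result = 0
--     for i in range(12):
--         result += constants[i] * eq_comp_matrix[i][day][stock_num]
--     return result
--
-- def generate_weight_matrix(eq_comp_matrix, parsed_data):
--     weight_matrix = []
--     for day in range(len(parsed_data)):
--         stock_weights = []
--         for stock_num in range(NUM_STOCKS):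
--             stock_weights.append(weight(day, stock_num, eq_comp_matrix))
--         weight_matrix.append(stock_weights)
--     return weight_matrix
-- ===== SOURCE B (Python) =====
-- NUM_STOCKS = 100
--
-- CONSTS = [1,1,1,1,1,1,1,1,1,1,1,1]
--
-- def generate_weight_matrix(eq_comp_matrix, parsed_data):
--     weight_matrix = []
--     for day in range(len(parsed_data)):
--         if day < 2:
--             weight_matrix.append([99] * NUM_STOCKS)
--             continue
--         row = [0] * NUM_STOCKS
--         for i in range(12):
--             c = CONSTS[i]
--             layer = eq_comp_matrix[i][day]
--             row = [row[s] + c * layer[s] for s in range(NUM_STOCKS)]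
--         weight_matrix.append(row)
--     return weight_matrix
-- ===== Notes on version B (the rewrite author's own statement) =====
-- stated objective: alternative
-- what changed: B hoists the day<2 test out of the per-cell helper to row level (appending a [99]*NUM_STOCKS row directly) and swaps the loop nesting: it keeps a running-sum row vector and folds the 12 layers as the outer loop, adding each layer's day-slice into the row, instead of calling a per-cell weight() that re-scans the 12 layers for every stock.
import Mathlib
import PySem

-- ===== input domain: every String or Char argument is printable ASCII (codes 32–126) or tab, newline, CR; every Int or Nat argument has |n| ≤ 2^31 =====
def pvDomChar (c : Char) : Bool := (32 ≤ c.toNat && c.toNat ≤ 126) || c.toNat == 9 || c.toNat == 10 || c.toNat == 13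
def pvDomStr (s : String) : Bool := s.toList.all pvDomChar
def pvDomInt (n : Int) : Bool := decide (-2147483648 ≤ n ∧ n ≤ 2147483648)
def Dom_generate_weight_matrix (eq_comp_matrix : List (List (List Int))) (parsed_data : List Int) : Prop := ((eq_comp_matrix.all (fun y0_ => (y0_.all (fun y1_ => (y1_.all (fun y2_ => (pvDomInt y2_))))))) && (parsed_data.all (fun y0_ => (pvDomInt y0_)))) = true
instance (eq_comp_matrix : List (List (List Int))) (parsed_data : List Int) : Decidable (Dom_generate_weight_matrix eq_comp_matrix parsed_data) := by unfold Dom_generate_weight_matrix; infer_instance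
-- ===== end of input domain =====

-- B hoists the day<2 branch to row level and swaps the loop nesting (outer loop over the 12
-- layers, running-sum row vector) instead of a per-cell weight() helper; same cost, different
-- decomposition ("alternative").
-- Python list indexing ecm[i][day][s] raises IndexError when out of range; the ports use
-- PySem.List.pyGetD (exact wherever the index is in range, which Pre_ guarantees).

-- ===== PORT A =====
def pvCONSTS : List Int := [1, 1, 1, 1, 1, 1, 1, 1, 1, 1, 1, 1]

def pvWeight (day : Int) (stock_num : Int) (eq_comp_matrix : List (List (List Int))) : Int :=
  if day < 2 then 99
  else
    (PySem.List.pyRange 0 12 1).foldl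
      (fun result i =>
        result + PySem.List.pyGetD pvCONSTS i 0 *
          PySem.List.pyGetD
            (PySem.List.pyGetD (PySem.List.pyGetD eq_comp_matrix i []) day []) stock_num 0)
      0

def generate_weight_matrix (eq_comp_matrix : List (List (List Int))) (parsed_data : List Int) : List (List Int) :=
  (PySem.List.pyRange 0 (parsed_data.length : Int) 1).foldl
    (fun weight_matrix day =>
      weight_matrix ++
        [(PySem.List.pyRange 0 100 1).foldl
          (fun stock_weights stock_num => stock_weights ++ [pvWeight day stock_num eq_comp_matrix]) []])
    []

-- ===== PORT B =====
def generate_weight_matrix_alt (eq_comp_matrix : List (List (List Int))) (parsed_data : List Int) : List (List Int) :=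
  (PySem.List.pyRange 0 (parsed_data.length : Int) 1).foldl
    (fun weight_matrix day =>
      weight_matrix ++
        [if day < 2 then List.replicate 100 99
         else
           (PySem.List.pyRange 0 12 1).foldl
             (fun row i =>
               let c := PySem.List.pyGetD pvCONSTS i 0
               let layer := PySem.List.pyGetD (PySem.List.pyGetD eq_comp_matrix i []) day []
               (PySem.List.pyRange 0 100 1).map
                 (fun s => PySem.List.pyGetD row s 0 + c * PySem.List.pyGetD layer s 0))
             (List.replicate 100 0)])
    []

-- ===== PRECONDITION & SPEC =====
-- Pre_: exactly the inputs where Python A returns (no IndexError): for every day ≥ 2 that is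
-- iterated, all 12 layers exist, have a row for that day, and that row has ≥ 100 entries.
def Pre_generate_weight_matrix (eq_comp_matrix : List (List (List Int))) (parsed_data : List Int) : Prop :=
  ∀ day, day < parsed_data.length → 2 ≤ day → ∀ i, i < 12 →
    i < eq_comp_matrix.length ∧ day < (eq_comp_matrix.getD i []).length ∧
      100 ≤ ((eq_comp_matrix.getD i []).getD day []).length

instance (eq_comp_matrix : List (List (List Int))) (parsed_data : List Int) : Decidable (Pre_generate_weight_matrix eq_comp_matrix parsed_data) := by unfold Pre_generate_weight_matrix; infer_instance

def pvWitness_generate_weight_matrix : List (List (List Int)) × List Int := ([], [3, 7])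

def Spec_generate_weight_matrix (eq_comp_matrix : List (List (List Int))) (parsed_data : List Int) (out : List (List Int)) : Prop := out = generate_weight_matrix_alt eq_comp_matrix parsed_data
instance (eq_comp_matrix : List (List (List Int))) (parsed_data : List Int) (out : List (List Int)) : Decidable (Spec_generate_weight_matrix eq_comp_matrix parsed_data out) := by unfold Spec_generate_weight_matrix; infer_instance

-- ===== CLAIM (what is proved, stated in full; the proofs are below) =====
def Claim_equal_generate_weight_matrix : Prop := ∀ (eq_comp_matrix : List (List (List Int))) (parsed_data : List Int), Dom_generate_weight_matrix eq_comp_matrix parsed_data → Pre_generate_weight_matrix eq_comp_matrix parsed_data → Spec_generate_weight_matrix eq_comp_matrix parsed_data (generate_weight_matrix eq_comp_matrix parsed_data)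

-- ===== LEMMAS AND PROOFS =====

-- Loop interchange: folding the layers (outer) while mapping the 100 stock slots (inner,
-- reading the previous row back by index) equals, slot by slot, the fold over the layers.
lemma pv_layers_fold (l : List Int) (g : Int → Int → Int) (h : Int → Int) :
    l.foldl
      (fun row i =>
        (PySem.List.pyRange 0 100 1).map (fun s => PySem.List.pyGetD row s 0 + g i s))
      ((PySem.List.pyRange 0 100 1).map h)
    = (PySem.List.pyRange 0 100 1).map (fun s => l.foldl (fun a i => a + g i s) (h s)) := by
  induction l generalizing h with
  | nil => simp
  | cons i l ih =>
    simp only [List.foldl_cons]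
    have hstep :
        (PySem.List.pyRange 0 100 1).map
          (fun s => PySem.List.pyGetD ((PySem.List.pyRange 0 100 1).map h) s 0 + g i s)
        = (PySem.List.pyRange 0 100 1).map (fun s => h s + g i s) := by
      apply List.map_congr_left
      intro s hs
      have hb : 0 ≤ s ∧ s < 100 := by
        have := PySem.List.mem_pyRange_one.mp hs
        omega
      rw [PySem.List.pyGetD_map_pyRange_of_nonneg _ _ _ _ hb.1 hb.2]
    rw [hstep, ih]

lemma pv_rows_eq (eq_comp_matrix : List (List (List Int))) (day : Int) :
    (PySem.List.pyRange 0 100 1).map (fun s => pvWeight day s eq_comp_matrix)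
    = if day < 2 then List.replicate 100 99
      else
        (PySem.List.pyRange 0 12 1).foldl
          (fun row i =>
            let c := PySem.List.pyGetD pvCONSTS i 0
            let layer := PySem.List.pyGetD (PySem.List.pyGetD eq_comp_matrix i []) day []
            (PySem.List.pyRange 0 100 1).map
              (fun s => PySem.List.pyGetD row s 0 + c * PySem.List.pyGetD layer s 0))
          (List.replicate 100 0) := by
  by_cases h2 : day < 2
  · simp only [pvWeight, if_pos h2]
    decide
  · rw [if_neg h2]
    have hrep : (List.replicate 100 (0 : Int)) = (PySem.List.pyRange 0 100 1).map (fun _ => 0) := by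
      decide
    rw [hrep,
      pv_layers_fold (PySem.List.pyRange 0 12 1)
        (fun i s =>
          PySem.List.pyGetD pvCONSTS i 0 *
            PySem.List.pyGetD
              (PySem.List.pyGetD (PySem.List.pyGetD eq_comp_matrix i []) day []) s 0)
        (fun _ => 0)]
    apply List.map_congr_left
    intro s _
    simp only [pvWeight, if_neg h2]

theorem generate_weight_matrix_eq (eq_comp_matrix : List (List (List Int))) (parsed_data : List Int) :
    generate_weight_matrix eq_comp_matrix parsed_data
    = generate_weight_matrix_alt eq_comp_matrix parsed_data := by
  unfold generate_weight_matrix generate_weight_matrix_alt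
  rw [PySem.List.foldl_append_singleton_eq_map, PySem.List.foldl_append_singleton_eq_map]
  simp only [List.nil_append]
  apply List.map_congr_left
  intro day _
  rw [PySem.List.foldl_append_singleton_eq_map]
  simpa using pv_rows_eq eq_comp_matrix day

-- ===== VERDICT (by name: the statement is the Claim_ definition above) =====
theorem generate_weight_matrix_spec : Claim_equal_generate_weight_matrix := by
  intro ecm pd _ _
  unfold Spec_generate_weight_matrix
  exact generate_weight_matrix_eq ecm pd
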